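-- pv_equiv track=rewrite | github.com/xxxxCham/backtest_core | data/config.py | categorize_timeframes
-- ===== SOURCE A (Python) =====
-- from typing import Any, Dict, List, NamedTuple, Optional, Tuple
--
-- TIMEFRAME_CATEGORIES = {
--     "scalping": ["1m", "3m", "5m"],           # Trading haute fréquence
--     "intraday": ["15m", "30m", "1h", "2h"],   # Trading intraday
--     "swing": ["4h", "6h", "8h", "12h"],        # Swing trading
--     "position": ["1d", "3d", "1w", "1M"]       # Position trading
-- }
--
-- def categorize_timeframes(timeframes: List[str]) -> Dict[str, List[str]]:
--     """
--     Catégorise les timeframes selon leur durée.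
--
--     Args:
--         timeframes: Liste des timeframes à catégoriser
--
--     Returns:
--         Dict avec clés 'scalping', 'intraday', 'swing', 'position'
--     """
--     categories = {
--         'scalping': [],
--         'intraday': [],
--         'swing': [],
--         'position': []
--     }
--
--     for tf in timeframes:
--         for category, tf_list in TIMEFRAME_CATEGORIES.items():
--             if tf in tf_list:
--                 categories[category].append(tf)
--                 break
--
--     return categories
-- ===== SOURCE B (Python) =====
-- from typing import Any, Dict, List, NamedTuple, Optional, Tuple
--
-- TIMEFRAME_CATEGORIES = {
--     "scalping": ["1m", "3m", "5m"],
--     "intraday": ["15m", "30m", "1h", "2h"],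
--     "swing": ["4h", "6h", "8h", "12h"],
--     "position": ["1d", "3d", "1w", "1M"]
-- }
--
-- def categorize_timeframes(timeframes: List[str]) -> Dict[str, List[str]]:
--     # Category-major: one filter pass over the input per category.
--     # Correct because the category lists are pairwise disjoint, so each
--     # timeframe matches at most one category and order/duplicates are kept.
--     return {cat: [tf for tf in timeframes if tf in tfs]
--             for cat, tfs in TIMEFRAME_CATEGORIES.items()}
-- ===== Notes on version B (the rewrite author's own statement) =====
-- stated objective: simpler
-- what changed: Inverts the loop structure: instead of a single input-major pass that routes each timeframe into a mutable dict via a nested scan with break, B is category-major -- a dict comprehension that makes one filter pass over the input per category (correct because the category lists are pairwise disjoint).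
import Mathlib
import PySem

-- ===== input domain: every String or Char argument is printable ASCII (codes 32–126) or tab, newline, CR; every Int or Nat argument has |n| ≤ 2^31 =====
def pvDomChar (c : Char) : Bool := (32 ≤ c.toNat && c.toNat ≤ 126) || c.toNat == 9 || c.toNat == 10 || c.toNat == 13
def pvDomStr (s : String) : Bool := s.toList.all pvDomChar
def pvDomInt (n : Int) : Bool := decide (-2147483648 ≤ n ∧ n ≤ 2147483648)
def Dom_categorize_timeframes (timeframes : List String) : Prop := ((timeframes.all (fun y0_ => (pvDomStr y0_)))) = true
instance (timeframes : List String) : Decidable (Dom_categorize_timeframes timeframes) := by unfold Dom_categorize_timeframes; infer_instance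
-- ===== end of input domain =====

-- B inverts the loop structure: category-major filter passes (one pass over the input
-- per category, via a dict comprehension) instead of A's input-major pass with a
-- nested scan and break; return value only, no mutation involved.

-- ===== PORT A =====
-- TIMEFRAME_CATEGORIES, in insertion order
def tfCategories : List (String × List String) :=
  [("scalping", ["1m", "3m", "5m"]),
   ("intraday", ["15m", "30m", "1h", "2h"]),
   ("swing",    ["4h", "6h", "8h", "12h"]),
   ("position", ["1d", "3d", "1w", "1M"])]

-- the inner 'for category, tf_list in TIMEFRAME_CATEGORIES.items(): … break'
def innerScan (tf : String) : List (String × List String) →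
    PySem.Dict String (List String) → PySem.Dict String (List String)
  | [], cats => cats
  | (category, tf_list) :: rest, cats =>
    if tf_list.contains tf then cats.modify category [] (· ++ [tf])
    else innerScan tf rest cats

def categorize_timeframes (timeframes : List String) : List (String × List String) :=
  let categories : PySem.Dict String (List String) :=
    PySem.Dict.ofList [("scalping", []), ("intraday", []), ("swing", []), ("position", [])]
  (timeframes.foldl (fun cats tf => innerScan tf tfCategories cats) categories).items

-- ===== PORT B =====
-- {cat: [tf for tf in timeframes if tf in tfs] for cat, tfs in TIMEFRAME_CATEGORIES.items()}
def categorize_timeframes_alt (timeframes : List String) : List (String × List String) :=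
  tfCategories.map (fun p => (p.1, timeframes.filter (fun tf => p.2.contains tf)))

-- ===== PRECONDITION & SPEC =====
def Spec_categorize_timeframes (timeframes : List String) (out : List (String × List String)) : Prop := out = categorize_timeframes_alt timeframes
instance (timeframes : List String) (out : List (String × List String)) : Decidable (Spec_categorize_timeframes timeframes out) := by unfold Spec_categorize_timeframes; infer_instance

-- ===== CLAIM (what is proved, stated in full; the proofs are below) =====
def Claim_equal_categorize_timeframes : Prop := ∀ (timeframes : List String), Dom_categorize_timeframes timeframes → Spec_categorize_timeframes timeframes (categorize_timeframes timeframes)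

-- ===== LEMMAS AND PROOFS =====

def l1 : List String := ["1m", "3m", "5m"]
def l2 : List String := ["15m", "30m", "1h", "2h"]
def l3 : List String := ["4h", "6h", "8h", "12h"]
def l4 : List String := ["1d", "3d", "1w", "1M"]

def mkState (a b c d : List String) : PySem.Dict String (List String) :=
  PySem.Dict.mk [("scalping", a), ("intraday", b), ("swing", c), ("position", d)]

-- one step of A's loop on the canonical four-key state
lemma innerScan_mkState (tf : String) (a b c d : List String) :
    innerScan tf tfCategories (mkState a b c d) =
      if l1.contains tf then mkState (a ++ [tf]) b c d
      else if l2.contains tf then mkState a (b ++ [tf]) c d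
      else if l3.contains tf then mkState a b (c ++ [tf]) d
      else if l4.contains tf then mkState a b c (d ++ [tf])
      else mkState a b c d := by
  simp only [tfCategories, innerScan, mkState, l1, l2, l3, l4]
  split_ifs <;> rfl

-- disjointness of the category lists
lemma disj12 (tf : String) (h : tf ∈ l1) : tf ∉ l2 := by
  simp [l1] at h; rcases h with h|h|h <;> subst h <;> decide
lemma disj13 (tf : String) (h : tf ∈ l1) : tf ∉ l3 := by
  simp [l1] at h; rcases h with h|h|h <;> subst h <;> decide
lemma disj14 (tf : String) (h : tf ∈ l1) : tf ∉ l4 := by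
  simp [l1] at h; rcases h with h|h|h <;> subst h <;> decide
lemma disj23 (tf : String) (h : tf ∈ l2) : tf ∉ l3 := by
  simp [l2] at h; rcases h with h|h|h|h <;> subst h <;> decide
lemma disj24 (tf : String) (h : tf ∈ l2) : tf ∉ l4 := by
  simp [l2] at h; rcases h with h|h|h|h <;> subst h <;> decide
lemma disj34 (tf : String) (h : tf ∈ l3) : tf ∉ l4 := by
  simp [l3] at h; rcases h with h|h|h|h <;> subst h <;> decide

-- loop invariant: A's fold appends exactly the four filters
lemma fold_invariant (tfs : List String) :
    ∀ (a b c d : List String),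
      (tfs.foldl (fun cats tf => innerScan tf tfCategories cats) (mkState a b c d)).items =
        [("scalping", a ++ tfs.filter (fun tf => l1.contains tf)),
         ("intraday", b ++ tfs.filter (fun tf => l2.contains tf)),
         ("swing",    c ++ tfs.filter (fun tf => l3.contains tf)),
         ("position", d ++ tfs.filter (fun tf => l4.contains tf))] := by
  induction tfs with
  | nil => intro a b c d; simp [mkState]
  | cons tf rest ih =>
    intro a b c d
    simp only [List.foldl_cons, innerScan_mkState, List.filter_cons]
    by_cases h1 : tf ∈ l1
    · simp [h1, disj12 tf h1, disj13 tf h1, disj14 tf h1, ih]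
    · by_cases h2 : tf ∈ l2
      · simp [h1, h2, disj23 tf h2, disj24 tf h2, ih]
      · by_cases h3 : tf ∈ l3
        · simp [h1, h2, h3, disj34 tf h3, ih]
        · by_cases h4 : tf ∈ l4
          · simp [h1, h2, h3, h4, ih]
          · simp [h1, h2, h3, h4, ih]

-- ===== VERDICT (by name: the statement is the Claim_ definition above) =====
theorem categorize_timeframes_spec : Claim_equal_categorize_timeframes := by
  intro timeframes _
  unfold Spec_categorize_timeframes categorize_timeframes categorize_timeframes_alt
  have hinit : PySem.Dict.ofList
      [("scalping", ([] : List String)), ("intraday", []), ("swing", []), ("position", [])] =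
      mkState [] [] [] [] := by rfl
  rw [hinit, fold_invariant timeframes [] [] [] []]
  simp [tfCategories, l1, l2, l3, l4]
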